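-- pv_equiv track=rewrite | github.com/asleake/AdventOfCode2020 | common/airport_functions.py | checkCustomsGroup
-- ===== SOURCE A (Python) =====
-- def checkCustomsGroup(responses):
--     numberOfMatches = 0
--     if len(responses) < 2:
--         return(len(responses[0]))
--     for answer in responses[0]:
--         restOfGroup = responses[1:]
--         count = len([value for response in restOfGroup for value in response if value==answer])
--         if count == len(responses) - 1:
--             numberOfMatches += 1
--     return numberOfMatches
-- ===== SOURCE B (Python) =====
-- def _exactRuns(pool, need):
--     # pool is sorted; return the set of chars whose run length is exactly need
--     if not pool:
--         return set()
--     head = pool[0]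
--     run = 1
--     while run < len(pool) and pool[run] == head:
--         run += 1
--     rest = _exactRuns(pool[run:], need)
--     if run == need:
--         rest.add(head)
--     return rest
--
-- def checkCustomsGroup(responses):
--     if len(responses) < 2:
--         return len(responses[0])
--     pool = sorted(ch for response in responses[1:] for ch in response)
--     exact = _exactRuns(pool, len(responses) - 1)
--     total = 0
--     for ch in responses[0]:
--         if ch in exact:
--             total += 1
--     return total
-- ===== Notes on version B (the rewrite author's own statement) =====
-- stated objective: alternative
-- what changed: Instead of re-scanning responses[1:] for each answer, B sorts the concatenation of responses[1:] once, run-length-decomposes the sorted pool recursively to build the set of characters whose run length is exactly len(responses)-1, and then counts membership of responses[0]'s characters in that set.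
import Mathlib
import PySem

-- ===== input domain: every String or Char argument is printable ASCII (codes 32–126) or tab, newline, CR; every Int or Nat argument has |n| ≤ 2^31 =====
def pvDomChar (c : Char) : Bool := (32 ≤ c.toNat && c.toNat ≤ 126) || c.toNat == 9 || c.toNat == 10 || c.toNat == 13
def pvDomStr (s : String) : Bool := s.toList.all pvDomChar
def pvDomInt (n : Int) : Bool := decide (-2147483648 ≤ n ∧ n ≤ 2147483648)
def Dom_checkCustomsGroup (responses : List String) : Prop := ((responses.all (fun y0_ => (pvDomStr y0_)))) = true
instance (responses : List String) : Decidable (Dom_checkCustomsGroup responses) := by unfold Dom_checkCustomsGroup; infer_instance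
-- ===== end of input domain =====

-- B replaces A's per-answer rescan of responses[1:] with a sort of the concatenated
-- rest, a recursive run-length decomposition collecting the chars whose run length is
-- exactly len(responses)-1, and a membership count over responses[0] (alternative algorithm).


-- ===== PORT A =====
def checkCustomsGroup (responses : List String) : Int :=
  if responses.length < 2 then
    -- responses[0]: raises IndexError when responses = [] (excluded by Pre_); value 0 is a dummy there
    match responses with
    | [] => 0
    | r0 :: _ => (r0.toList.length : Int)
  else
    (responses.headD "").toList.foldl
      (fun numberOfMatches answer =>
        let restOfGroup := PySem.List.slice responses (some 1) none
        let count : Int :=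
          ((restOfGroup.foldl
              (fun (l : List Char) response => l ++ response.toList.filter (fun value => value == answer))
              []).length : Int)
        if count = (responses.length : Int) - 1 then numberOfMatches + 1 else numberOfMatches)
      0

-- ===== PORT B =====
-- _exactRuns(pool, need): pool is sorted; the while loop measuring the head's run is the
-- takeWhile/dropWhile split (exact: the run of chars equal to pool[0] is contiguous prefix).
def pvExactRuns : List Char → Int → PySem.Set Char
  | [], _ => PySem.Set.empty
  | head :: t, need =>
    let run : Int := 1 + ((t.takeWhile (fun c => c == head)).length : Int)
    let rest := pvExactRuns (t.dropWhile (fun c => c == head)) need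
    if run = need then PySem.Set.add rest head else rest
  termination_by pool => pool.length
  decreasing_by
    simpa using Nat.lt_succ_of_le (List.length_dropWhile_le _ _)

def checkCustomsGroup_alt (responses : List String) : Int :=
  if responses.length < 2 then
    match responses with
    | [] => 0
    | r0 :: _ => (r0.toList.length : Int)
  else
    let pool : List Char :=
      PySem.List.sorted ((PySem.List.slice responses (some 1) none).flatMap String.toList)
        (fun x => x) false
    let exact := pvExactRuns pool ((responses.length : Int) - 1)
    (responses.headD "").toList.foldl
      (fun total ch => if PySem.Set.contains exact ch then total + 1 else total)
      0

-- ===== PRECONDITION & SPEC =====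
-- Pre_ excludes only responses = [], where Python A raises IndexError on responses[0].
def Pre_checkCustomsGroup (responses : List String) : Prop := responses ≠ []
instance (responses : List String) : Decidable (Pre_checkCustomsGroup responses) := by unfold Pre_checkCustomsGroup; infer_instance
def pvWitness_checkCustomsGroup : List String := (["ab", "b"])
def Spec_checkCustomsGroup (responses : List String) (out : Int) : Prop := out = checkCustomsGroup_alt responses
instance (responses : List String) (out : Int) : Decidable (Spec_checkCustomsGroup responses out) := by unfold Spec_checkCustomsGroup; infer_instance

-- ===== CLAIM (what is proved, stated in full; the proofs are below) =====
def Claim_equal_checkCustomsGroup : Prop := ∀ (responses : List String), Dom_checkCustomsGroup responses → Pre_checkCustomsGroup responses → Spec_checkCustomsGroup responses (checkCustomsGroup responses)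

-- ===== LEMMAS AND PROOFS =====

-- A's inner comprehension length, generalized over the accumulator:
-- the appended-filter fold counts occurrences of `answer` across all responses.
theorem pv_acount (answer : Char) : ∀ (rs : List String) (init : List Char),
    ((rs.foldl (fun (l : List Char) response => l ++ response.toList.filter (fun value => value == answer)) init).length : Int)
      = (init.length : Int) + ((rs.flatMap String.toList).count answer : Int) := by
  intro rs
  induction rs with
  | nil => intro init; simp
  | cons r rest ih =>
    intro init
    simp only [List.foldl_cons, ih, List.flatMap_cons, List.count_append, List.length_append]
    push_cast [List.count_eq_length_filter]
    ring

-- In a sorted list every copy of the minimum is in the initial takeWhile run.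
theorem pv_run_count (h : Char) : ∀ (t : List Char), t.Pairwise (· ≤ ·) → (∀ x ∈ t, h ≤ x) →
    t.count h = (t.takeWhile (fun c => c == h)).length ∧ h ∉ t.dropWhile (fun c => c == h) := by
  intro t
  induction t with
  | nil => intro _ _; simp
  | cons a t' ih =>
    intro hp hge
    by_cases ha : a = h
    · subst ha
      have hp' := (List.pairwise_cons.mp hp).2
      have hge' : ∀ x ∈ t', a ≤ x := (List.pairwise_cons.mp hp).1
      obtain ⟨hc, hd⟩ := ih hp' hge'
      constructor
      · simp [hc]
      · simpa using hd
    · have hlt : h < a := lt_of_le_of_ne (hge a (by simp)) (fun e => ha e.symm)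
      have hnotin : h ∉ a :: t' := by
        intro hm
        rcases List.mem_cons.mp hm with rfl | hm'
        · exact ha rfl
        · exact absurd ((List.pairwise_cons.mp hp).1 h hm') (not_le.mpr hlt)
      constructor
      · simp only [List.takeWhile_cons]
        have : (a == h) = false := by simp [ha]
        simp [this, List.count_eq_zero.mpr hnotin]
      · simp only [List.dropWhile_cons]
        have : (a == h) = false := by simp [ha]
        simpa [this] using hnotin

-- Membership in B's run-length set characterizes "count equals need" on a sorted pool.
theorem pv_mem_exactRuns (need : Int) (hneed : 1 ≤ need) : ∀ (n : Nat) (pool : List Char),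
    pool.length ≤ n → pool.Pairwise (· ≤ ·) →
    ∀ ch, ch ∈ pvExactRuns pool need ↔ ((pool.count ch : Int) = need) := by
  intro n
  induction n with
  | zero =>
    intro pool hlen _ ch
    have : pool = [] := List.length_eq_zero_iff.mp (Nat.le_zero.mp hlen)
    subst this
    simp [pvExactRuns, PySem.Set.empty]
    omega
  | succ m ih =>
    intro pool hlen hp ch
    match pool with
    | [] =>
      simp [pvExactRuns, PySem.Set.empty]
      omega
    | h :: t =>
      have hp' := (List.pairwise_cons.mp hp).2
      have hge : ∀ x ∈ t, h ≤ x := (List.pairwise_cons.mp hp).1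
      obtain ⟨hc, hd⟩ := pv_run_count h t hp' hge
      have hdw_len : (t.dropWhile (fun c => c == h)).length ≤ m := by
        have := List.length_dropWhile_le (fun c => c == h) t
        simp at hlen; omega
      have hdw_pair : (t.dropWhile (fun c => c == h)).Pairwise (· ≤ ·) :=
        hp'.sublist (List.dropWhile_sublist _)
      have ihdw := ih (t.dropWhile (fun c => c == h)) hdw_len hdw_pair
      have hcons : pvExactRuns (h :: t) need =
          if (1 + ((t.takeWhile (fun c => c == h)).length : Int)) = need
          then PySem.Set.add (pvExactRuns (t.dropWhile (fun c => c == h)) need) h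
          else pvExactRuns (t.dropWhile (fun c => c == h)) need := by
        rw [pvExactRuns]
      rw [hcons]
      have hcnt_h : (((h :: t).count h : Int)) = 1 + ((t.takeWhile (fun c => c == h)).length : Int) := by
        simp [hc]; ring
      by_cases hch : ch = h
      · subst hch
        have hnotrest : ch ∉ pvExactRuns (t.dropWhile (fun c => c == ch)) need := by
          rw [ihdw ch]
          have : ((t.dropWhile (fun c => c == ch)).count ch : Int) = 0 := by
            simpa using List.count_eq_zero.mpr hd
          rw [this]; omega
        by_cases hrun : (1 + ((t.takeWhile (fun c => c == ch)).length : Int)) = need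
        · rw [if_pos hrun, PySem.Set.mem_add]
          constructor
          · intro _; rw [hcnt_h]; exact hrun
          · intro _; right; rfl
        · rw [if_neg hrun]
          constructor
          · intro hm; exact absurd hm hnotrest
          · intro he; rw [hcnt_h] at he; exact absurd he hrun
      · have htw0 : (t.takeWhile (fun c => c == h)).count ch = 0 := by
          apply List.count_eq_zero.mpr
          intro hm
          have := List.mem_takeWhile_imp hm
          simp at this
          exact hch this
        have hcnt_ne : (h :: t).count ch = (t.dropWhile (fun c => c == h)).count ch := by
          have hsplit : t = t.takeWhile (fun c => c == h) ++ t.dropWhile (fun c => c == h) :=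
            (List.takeWhile_append_dropWhile (p := fun c => c == h) (l := t)).symm
          rw [List.count_cons]
          conv_lhs => rw [hsplit]
          rw [List.count_append, htw0]
          simp only [Nat.zero_add]
          have : (h == ch) = false := by simp; exact fun e => hch e.symm
          simp [this]
        by_cases hrun : (1 + ((t.takeWhile (fun c => c == h)).length : Int)) = need
        · rw [if_pos hrun, PySem.Set.mem_add]
          rw [ihdw ch, hcnt_ne]
          constructor
          · rintro (he | rfl)
            · exact he
            · exact absurd rfl hch
          · intro he; left; exact he
        · rw [if_neg hrun, ihdw ch, hcnt_ne]

-- ===== VERDICT (by name: the statement is the Claim_ definition above) =====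
theorem checkCustomsGroup_spec : Claim_equal_checkCustomsGroup := by
  intro responses _ _
  unfold Spec_checkCustomsGroup checkCustomsGroup checkCustomsGroup_alt
  by_cases h : responses.length < 2
  · simp [h]
  · simp only [h, if_false]
    have hneed : (1 : Int) ≤ (responses.length : Int) - 1 := by
      simp at h; omega
    have hperm := PySem.List.sorted_perm
      ((PySem.List.slice responses (some 1) none).flatMap String.toList) (fun x : Char => x) false
    have hpair : (PySem.List.sorted ((PySem.List.slice responses (some 1) none).flatMap String.toList)
        (fun x : Char => x) false).Pairwise (· ≤ ·) := by
      simpa using PySem.List.sorted_pairwise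
        ((PySem.List.slice responses (some 1) none).flatMap String.toList) (fun x : Char => x)
    have hfun : (fun (numberOfMatches : Int) (answer : Char) =>
        if ((((PySem.List.slice responses (some 1) none).foldl
              (fun (l : List Char) response => l ++ response.toList.filter (fun value => value == answer)) []).length : Int))
            = (responses.length : Int) - 1 then numberOfMatches + 1 else numberOfMatches)
        = (fun (total : Int) (ch : Char) =>
        if PySem.Set.contains (pvExactRuns
              (PySem.List.sorted ((PySem.List.slice responses (some 1) none).flatMap String.toList) (fun x => x) false)
              ((responses.length : Int) - 1)) ch
          then total + 1 else total) := by
      funext acc ch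
      rw [pv_acount]
      have hmem := pv_mem_exactRuns ((responses.length : Int) - 1) hneed
        (PySem.List.sorted ((PySem.List.slice responses (some 1) none).flatMap String.toList) (fun x => x) false).length
        (PySem.List.sorted ((PySem.List.slice responses (some 1) none).flatMap String.toList) (fun x => x) false)
        le_rfl hpair ch
      have hcnteq : (PySem.List.sorted ((PySem.List.slice responses (some 1) none).flatMap String.toList)
          (fun x : Char => x) false).count ch
          = ((PySem.List.slice responses (some 1) none).flatMap String.toList).count ch :=
        hperm.count_eq ch
      by_cases hmem2 : PySem.Set.contains (pvExactRuns
          (PySem.List.sorted ((PySem.List.slice responses (some 1) none).flatMap String.toList) (fun x => x) false)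
          ((responses.length : Int) - 1)) ch
      · simp only [hmem2, if_true]
        have hin : ch ∈ pvExactRuns
            (PySem.List.sorted ((PySem.List.slice responses (some 1) none).flatMap String.toList) (fun x => x) false)
            ((responses.length : Int) - 1) := by
          simpa [PySem.Set.contains] using hmem2
        have hv := hmem.mp hin
        rw [hcnteq] at hv
        simp [hv]
      · simp only [hmem2]
        have hnm : ¬ ch ∈ pvExactRuns
            (PySem.List.sorted ((PySem.List.slice responses (some 1) none).flatMap String.toList) (fun x => x) false)
            ((responses.length : Int) - 1) := by
          simpa [PySem.Set.contains] using hmem2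
        have : ¬ (((PySem.List.sorted ((PySem.List.slice responses (some 1) none).flatMap String.toList)
            (fun x : Char => x) false).count ch : Int) = (responses.length : Int) - 1) :=
          fun he => hnm (hmem.mpr he)
        rw [hcnteq] at this
        simp [this]
    rw [hfun]
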